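-- pv_equiv track=rewrite | github.com/DanielleaLange/ECE448-CS440 | mp4/viterbi_2.py | count_tagspairs
-- ===== SOURCE A (Python) =====
-- def count_tagspairs(train, wordtag,words_types):
--     tag_pair={}
--     tag_to_tag={}
--     tag_nxt={}
--     pos_pair={}
--     temp=[]
--     init = {}
--     for sen in train: # for each sentence
--
--         for pair_idx in range(len(sen)):# for all tags in each sentence
--             curr_tag=sen[pair_idx][1]
--             if pair_idx !=0:
--                  prev=sen[pair_idx-1][1]#for the previous sentence
-- #             pair=(prev, curr_tag)
-- #             temp.append(pair)
--             else:
--                 prev='START'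
--                 start_curr_pair = init.setdefault(curr_tag, {})
--                 tag_cnt = start_curr_pair.setdefault(prev, 0)
--                 start_curr_pair[prev]=tag_cnt + 1
--                 init[curr_tag]=start_curr_pair
--             if pair_idx == len(sen) - 1:
--                 continue
--             pair_nxt = sen[pair_idx + 1]
--             tag_nxt = pair_nxt[1]
--             tag_nxt_pair = tag_to_tag.setdefault(tag_nxt, {})
--             tag_cnt = tag_nxt_pair.setdefault(curr_tag, 0)
--             tag_nxt_pair[curr_tag] = tag_cnt + 1
--             tag_to_tag[tag_nxt] = tag_nxt_pair
--     #tag_pair=dict(Counter(temp))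
-- #     for element in tag_pair.keys():
-- #         pair=(element[0], element[1])
-- #         if element[0] not in tag_to_tag.keys():
-- #             count=tag_pair[element]
-- #             tag_to_tag[element[0]]={element[1]:count}
-- #         else:
-- #             count=tag_pair[element]
-- #             tag_to_tag[element[0]].update({element[1]:count})
--
--     # return {tag1:{tag1:count},{tag2:count}...} also holds no zero counts(missing tags)
--     return tag_to_tag,init
-- ===== SOURCE B (Python) =====
-- def count_tagspairs(train, wordtag, words_types):
--     # Phase 1: extract the flat streams — the (next_tag, curr_tag) bigram stream
--     # and the sentence-initial tag stream.
--     bigrams = [(nxt[1], cur[1]) for sen in train for cur, nxt in zip(sen, sen[1:])]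
--     heads = [sen[0][1] for sen in train if sen]
--     # Phase 2: build the nested dicts closed-form — deduplicate keys in
--     # first-appearance order (dict.fromkeys) and obtain each count by list.count;
--     # no incremental counters, no setdefault.
--     tag_to_tag = {
--         n: {c: bigrams.count((n, c))
--             for c in dict.fromkeys(c2 for n2, c2 in bigrams if n2 == n)}
--         for n in dict.fromkeys(n2 for n2, c2 in bigrams)}
--     init = {t: {'START': heads.count(t)} for t in dict.fromkeys(heads)}
--     return tag_to_tag, init
-- ===== Notes on version B (the rewrite author's own statement) =====
-- stated objective: alternative
-- what changed: A streams tokens through incrementally-updated nested setdefault counters in one interleaved index loop; B first extracts flat bigram/initial-tag streams, then builds each nested dict closed-form by deduplicating keys in first-appearance order (dict.fromkeys) and obtaining every count with list.count - no mutable counters at all.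
import Mathlib
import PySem

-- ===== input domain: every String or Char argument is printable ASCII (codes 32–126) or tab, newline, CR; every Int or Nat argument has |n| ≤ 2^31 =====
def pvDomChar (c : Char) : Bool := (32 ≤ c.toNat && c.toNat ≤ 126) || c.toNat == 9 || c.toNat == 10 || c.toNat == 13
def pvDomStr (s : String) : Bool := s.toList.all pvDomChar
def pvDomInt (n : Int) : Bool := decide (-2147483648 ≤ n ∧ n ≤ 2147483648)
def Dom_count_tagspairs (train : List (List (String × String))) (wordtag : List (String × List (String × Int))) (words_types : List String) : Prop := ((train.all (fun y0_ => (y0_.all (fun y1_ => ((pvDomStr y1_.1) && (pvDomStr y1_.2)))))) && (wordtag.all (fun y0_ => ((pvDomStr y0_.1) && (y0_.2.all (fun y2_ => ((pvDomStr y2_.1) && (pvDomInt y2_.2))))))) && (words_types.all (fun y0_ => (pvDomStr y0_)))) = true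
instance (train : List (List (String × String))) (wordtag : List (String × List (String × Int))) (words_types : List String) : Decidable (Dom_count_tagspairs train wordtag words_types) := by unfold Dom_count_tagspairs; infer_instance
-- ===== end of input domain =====

-- B replaces A's interleaved index loop of incrementally-updated nested setdefault counters by
-- stream extraction plus a closed-form regrouping (dedup the keys, count each with list.count);
-- an alternative algorithm of different shape (quadratic worst case, not claimed faster).

-- ===== PORT A =====
-- the nested-dict type both programs build: {str: {str: int}}
abbrev pvD2 := PySem.Dict String (PySem.Dict String Int)

-- A's four-line setdefault/insert pattern (appears verbatim twice: for init with inner key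
-- 'START', and for tag_to_tag): d.setdefault(k1,{}); inner.setdefault(k2,0); inner[k2]=cnt+1; d[k1]=inner
def pvAChain (d : pvD2) (k1 k2 : String) : pvD2 :=
  let d1 := d.setdefault k1 PySem.Dict.empty
  let inner := d1.getD k1 PySem.Dict.empty
  let cnt := inner.getD k2 0
  d1.insert k1 ((inner.setdefault k2 0).insert k2 (cnt + 1))

-- the body of A's inner 'for pair_idx in range(len(sen))' loop; state = (tag_to_tag, init)
def pvAStep (sen : List (String × String)) (st : pvD2 × pvD2) (pair_idx : Int) : pvD2 × pvD2 :=
  let curr_tag := (PySem.List.pyGetD sen pair_idx ("", "")).2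
  let init := if pair_idx ≠ 0 then st.2 else pvAChain st.2 curr_tag "START"
  if pair_idx == (sen.length : Int) - 1 then (st.1, init)   -- continue
  else
    let pair_nxt := PySem.List.pyGetD sen (pair_idx + 1) ("", "")
    let tag_nxt := pair_nxt.2
    (pvAChain st.1 tag_nxt curr_tag, init)

def count_tagspairs (train : List (List (String × String))) (wordtag : List (String × List (String × Int))) (words_types : List String) : (List (String × List (String × Int))) × (List (String × List (String × Int))) :=
  let st := train.foldl
    (fun st sen => (PySem.List.pyRange 0 (sen.length : Int) 1).foldl (pvAStep sen) st)
    (PySem.Dict.empty, PySem.Dict.empty)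
  (st.1.items.map (fun p => (p.1, p.2.items)), st.2.items.map (fun p => (p.1, p.2.items)))

-- ===== PORT B =====
def count_tagspairs_alt (train : List (List (String × String))) (wordtag : List (String × List (String × Int))) (words_types : List String) : (List (String × List (String × Int))) × (List (String × List (String × Int))) :=
  -- bigrams = [(nxt[1], cur[1]) for sen in train for cur, nxt in zip(sen, sen[1:])]
  let bigrams := train.flatMap (fun sen =>
    (List.zip sen (PySem.List.slice sen (some 1) none)).map (fun pq => (pq.2.2, pq.1.2)))
  -- heads = [sen[0][1] for sen in train if sen]
  let heads := train.filterMap (fun sen => sen.head?.map (fun p => p.2))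
  -- nested dict comprehensions over dict.fromkeys (= PySem.List.dedup) with list.count
  let tag_to_tag := (PySem.List.dedup (bigrams.map (fun b => b.1))).map (fun n =>
    (n, (PySem.List.dedup ((bigrams.filter (fun b => b.1 == n)).map (fun b => b.2))).map
        (fun c => (c, (bigrams.count (n, c) : Int)))))
  let init := (PySem.List.dedup heads).map (fun t => (t, [("START", (heads.count t : Int))]))
  (tag_to_tag, init)

-- ===== PRECONDITION & SPEC =====
def Spec_count_tagspairs (train : List (List (String × String))) (wordtag : List (String × List (String × Int))) (words_types : List String) (out : (List (String × List (String × Int))) × (List (String × List (String × Int)))) : Prop := out = count_tagspairs_alt train wordtag words_types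
instance (train : List (List (String × String))) (wordtag : List (String × List (String × Int))) (words_types : List String) (out : (List (String × List (String × Int))) × (List (String × List (String × Int)))) : Decidable (Spec_count_tagspairs train wordtag words_types out) := by unfold Spec_count_tagspairs; infer_instance

-- ===== CLAIM (what is proved, stated in full; the proofs are below) =====
def Claim_equal_count_tagspairs : Prop := ∀ (train : List (List (String × String))) (wordtag : List (String × List (String × Int))) (words_types : List String), Dom_count_tagspairs train wordtag words_types → Spec_count_tagspairs train wordtag words_types (count_tagspairs train wordtag words_types)

-- ===== LEMMAS AND PROOFS =====

-- one nested-dict increment at key k = (outer, inner): what A does per event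
def pvNAdd (t : pvD2) (k : String × String) : pvD2 :=
  t.insert k.1 ((t.getD k.1 PySem.Dict.empty).insert k.2 ((t.getD k.1 PySem.Dict.empty).getD k.2 0 + 1))

def pvPairKey (pq : (String × String) × (String × String)) : String × String := (pq.2.2, pq.1.2)

-- the (next_tag, curr_tag) event stream of one sentence, and the initial-tag stream
def pvPairKeys (sen : List (String × String)) : List (String × String) :=
  (List.zip sen sen.tail).map pvPairKey
def pvHeadsOf (sen : List (String × String)) : List String :=
  match sen with | [] => [] | p :: _ => [p.2]

-- the same event stream read off A's way, by indices a, a+1, …, len-2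
def pvKeysIdx (sen : List (String × String)) (a : Int) : List (String × String) :=
  (PySem.List.pyRange a ((sen.length : Int) - 1) 1).map
    (fun i => ((PySem.List.pyGetD sen (i + 1) ("", "")).2, (PySem.List.pyGetD sen i ("", "")).2))

-- B's closed-form regrouping of a key stream: distinct outer keys in first-appearance
-- order, per outer key the distinct inner keys in first-appearance order with counts
def pvGroup (ks : List (String × String)) : List (String × List (String × Int)) :=
  (PySem.Set.ofList (ks.map (fun b => b.1))).map (fun n =>
    (n, (PySem.Set.ofList ((ks.filter (fun b => b.1 == n)).map (fun b => b.2))).map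
        (fun c => (c, (ks.count (n, c) : Int)))))

-- A's setdefault chain is exactly one nested increment
theorem pvAChain_eq (d : pvD2) (k1 k2 : String) : pvAChain d k1 k2 = pvNAdd d (k1, k2) := by
  unfold pvAChain pvNAdd
  dsimp only
  by_cases hc : d.contains k1 = true
  · rw [PySem.Dict.setdefault_of_contains _ _ hc]
    by_cases hic : (d.getD k1 PySem.Dict.empty).contains k2 = true
    · rw [PySem.Dict.setdefault_of_contains _ _ hic]
    · rw [PySem.Dict.setdefault_of_not_contains _ _ (by simpa using hic),
        PySem.Dict.insert_insert_self]
  · rw [PySem.Dict.setdefault_of_not_contains _ _ (by simpa using hc)]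
    simp [PySem.Dict.getD_insert_self, PySem.Dict.insert_insert_self,
      PySem.Dict.getD_of_not_contains _ _ (by simpa using hc)]
    rw [PySem.Dict.setdefault_of_not_contains _ _ (by simp), PySem.Dict.insert_insert_self]

-- the tail of A's inner loop (indices ≥ 1): only tag_to_tag is touched
theorem pvTailLoop (sen : List (String × String)) :
    ∀ (m : Nat) (a : Int), 1 ≤ a → ((sen.length : Int) - a).toNat ≤ m → ∀ (st : pvD2 × pvD2),
    (PySem.List.pyRange a (sen.length : Int) 1).foldl (pvAStep sen) st
      = ((pvKeysIdx sen a).foldl pvNAdd st.1, st.2) := by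
  intro m
  induction m with
  | zero =>
    intro a ha hm st
    have hn : (sen.length : Int) ≤ a := by omega
    rw [PySem.List.pyRange_one_eq_nil hn, pvKeysIdx,
        PySem.List.pyRange_one_eq_nil (by omega)]
    rfl
  | succ m ih =>
    intro a ha hm st
    by_cases hlt : a < (sen.length : Int)
    · rw [PySem.List.pyRange_one_cons hlt, List.foldl_cons]
      have hne : a ≠ 0 := by omega
      by_cases hlast : a = (sen.length : Int) - 1
      · have hne' : ¬((sen.length : Int) - 1 = 0) := by omega
        have h1 : pvAStep sen st a = st := by
          simp [pvAStep, hlast, hne']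
        rw [h1, PySem.List.pyRange_one_eq_nil (by omega), pvKeysIdx,
            PySem.List.pyRange_one_eq_nil (by omega)]
        simp
      · have hlt2 : a < (sen.length : Int) - 1 := by omega
        have h1 : pvAStep sen st a
            = (pvNAdd st.1 ((PySem.List.pyGetD sen (a + 1) ("", "")).2,
                (PySem.List.pyGetD sen a ("", "")).2), st.2) := by
          simp [pvAStep, hne, hlast, pvAChain_eq]
        rw [h1, ih (a + 1) (by omega) (by omega)]
        unfold pvKeysIdx
        rw [PySem.List.pyRange_one_cons hlt2, List.map_cons, List.foldl_cons]
    · rw [PySem.List.pyRange_one_eq_nil (by omega), pvKeysIdx,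
          PySem.List.pyRange_one_eq_nil (by omega)]
      rfl

-- A's whole inner loop: the pair events in index order, plus one initial-tag event
theorem pvInnerLoop (sen : List (String × String)) (st : pvD2 × pvD2) :
    (PySem.List.pyRange 0 (sen.length : Int) 1).foldl (pvAStep sen) st
      = ((pvKeysIdx sen 0).foldl pvNAdd st.1,
         match sen with | [] => st.2 | p :: _ => pvNAdd st.2 (p.2, "START")) := by
  match sen with
  | [] =>
    rw [show ((List.length ([] : List (String × String))) : Int) = 0 by simp,
        PySem.List.pyRange_one_eq_nil le_rfl, pvKeysIdx]
    rw [PySem.List.pyRange_one_eq_nil (by simp)]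
    simp
  | p :: rest =>
    have hn : (0 : Int) < ((p :: rest).length : Int) := by simp
    rw [PySem.List.pyRange_one_cons hn, List.foldl_cons]
    by_cases h1 : ((p :: rest).length : Int) - 1 = 0
    · -- single-token sentence: only the init update fires
      have hr : ((rest.length : Int)) = 0 := by
        simp only [List.length_cons] at h1; push_cast at h1; omega
      have hstep : pvAStep (p :: rest) st 0 = (st.1, pvAChain st.2 p.2 "START") := by
        simp [pvAStep, hr]
      rw [hstep, PySem.List.pyRange_one_eq_nil (by omega), pvKeysIdx,
          PySem.List.pyRange_one_eq_nil (by omega)]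
      simp [pvAChain_eq]
    · -- ≥ 2 tokens: init update + first pair update, then the tail loop
      have hstep : pvAStep (p :: rest) st 0
          = (pvNAdd st.1 ((PySem.List.pyGetD (p :: rest) (1 : Int) ("", "")).2, p.2),
             pvNAdd st.2 (p.2, "START")) := by
        have hr : ¬((0 : Int) = (rest.length : Int)) := by
          simp only [List.length_cons] at h1; push_cast at h1; omega
        simp [pvAStep, pvAChain_eq, hr]
      rw [hstep, show (0 : Int) + 1 = 1 by norm_num,
          pvTailLoop (p :: rest) ((p :: rest).length) 1 le_rfl
            (by simp only [List.length_cons]; push_cast; omega)]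
      have hkeys : pvKeysIdx (p :: rest) 0
          = ((PySem.List.pyGetD (p :: rest) (1 : Int) ("", "")).2, p.2) :: pvKeysIdx (p :: rest) 1 := by
        unfold pvKeysIdx
        rw [PySem.List.pyRange_one_cons (by omega), List.map_cons]
        simp
      rw [hkeys, List.foldl_cons]

-- A's index-order event stream is the zip-order event stream
theorem pvKeysIdx_zero_eq (sen : List (String × String)) :
    pvKeysIdx sen 0 = (List.zip sen sen.tail).map pvPairKey := by
  unfold pvKeysIdx
  apply List.ext_getElem
  · simp only [List.length_map, PySem.List.length_pyRange_one, List.length_zip, List.length_tail]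
    omega
  · intro j h1 h2
    simp only [List.length_map] at h1 h2
    simp only [List.getElem_map]
    have hlen : (PySem.List.pyRange 0 ((sen.length : Int) - 1) 1).length = sen.length - 1 := by
      rw [PySem.List.length_pyRange_one]; omega
    have hj : j < sen.length - 1 := by rw [hlen] at h1; exact h1
    have hr : (PySem.List.pyRange 0 ((sen.length : Int) - 1) 1)[j] = (j : Int) := by
      rw [PySem.List.getElem_pyRange_one]; omega
    rw [hr]
    have hg1 : PySem.List.pyGetD sen ((j : Int) + 1) ("", "") = sen[j + 1]'(by omega) := by
      rw [show ((j : Int) + 1) = ((j + 1 : Nat) : Int) by push_cast; ring]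
      rw [PySem.List.pyGetD_natCast]
      exact List.getD_eq_getElem _ _ _
    have hg0 : PySem.List.pyGetD sen ((j : Int)) ("", "") = sen[j]'(by omega) := by
      rw [PySem.List.pyGetD_natCast]
      exact List.getD_eq_getElem _ _ _
    rw [hg1, hg0]
    have hz : (List.zip sen sen.tail)[j]'h2
        = (sen[j]'(by omega), sen.tail[j]'(by simp [List.length_tail]; omega)) :=
      List.getElem_zip
    rw [hz]
    unfold pvPairKey
    dsimp only
    rw [List.getElem_tail]

-- pvNAdd written in the keyed-insert shape the Dict fold lemmas expect
theorem pvNAdd_form : pvNAdd = (fun (d : pvD2) (x : String × String) =>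
    d.insert x.1 ((d.getD x.1 PySem.Dict.empty).insert x.2
      ((d.getD x.1 PySem.Dict.empty).getD x.2 0 + 1))) := rfl

-- the keys of the nested fold are the distinct outer keys in first-appearance order
theorem pvNAdd_keys (ks : List (String × String)) :
    (ks.foldl pvNAdd PySem.Dict.empty).keys = PySem.Set.ofList (ks.map (fun b => b.1)) := by
  rw [pvNAdd_form, PySem.Dict.keys_foldl_insert_key]
  simp [PySem.Dict.keys_empty, PySem.Set.ofList_eq_foldl, PySem.Set.update]

theorem pvNAdd_keys_nodup (ks : List (String × String)) :
    (ks.foldl pvNAdd PySem.Dict.empty).keys.Nodup := by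
  rw [pvNAdd_form]
  exact PySem.Dict.nodup_keys_foldl_insert_key ks _ _ _ (by simp [PySem.Dict.keys_empty])

-- one inner group of pvGroup
def pvGroupInner (ks : List (String × String)) (n : String) : List (String × Int) :=
  (PySem.Set.ofList ((ks.filter (fun b => b.1 == n)).map (fun b => b.2))).map
    (fun c => (c, (ks.count (n, c) : Int)))

-- appending one event (n', c') leaves the group of n ≠ n' untouched
theorem pvGroupInner_append_ne (ks : List (String × String)) (n : String)
    (k : String × String) (hne : k.1 ≠ n) :
    pvGroupInner (ks ++ [k]) n = pvGroupInner ks n := by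
  unfold pvGroupInner
  have hf : (ks ++ [k]).filter (fun b => b.1 == n) = ks.filter (fun b => b.1 == n) := by
    rw [List.filter_append]
    simp [hne]
  rw [hf]
  apply List.map_congr_left
  intro c _
  have h1 : (n, c) ≠ k := by
    intro h; exact hne (by rw [← h])
  simp [List.count_append, h1.symm]

-- appending one event (n, c) bumps the group of n the way one nested increment does
theorem pvInnerStep (dn : PySem.Dict String Int) (ks : List (String × String)) (n c : String)
    (h : dn.items = pvGroupInner ks n) :
    (dn.insert c (dn.getD c 0 + 1)).items = pvGroupInner (ks ++ [(n, c)]) n := by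
  have hkeys : dn.keys = (PySem.Set.ofList ((ks.filter (fun b => b.1 == n)).map (fun b => b.2))) := by
    show dn.items.map (fun p => p.1) = _
    rw [h]
    simp [pvGroupInner, List.map_map, Function.comp_def]
  have hnd : dn.keys.Nodup := by rw [hkeys]; exact PySem.Set.nodup_ofList _
  have hfilter : (ks ++ [(n, c)]).filter (fun b => b.1 == n)
      = ks.filter (fun b => b.1 == n) ++ [(n, c)] := by
    rw [List.filter_append]; simp
  by_cases hmem : c ∈ (PySem.Set.ofList ((ks.filter (fun b => b.1 == n)).map (fun b => b.2)))
  · -- key already present: in-place replacement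
    have hcon : dn.contains c = true := by
      rw [PySem.Dict.contains_iff_mem_keys, hkeys]; exact hmem
    have hgd : dn.getD c 0 = (ks.count (n, c) : Int) :=
      PySem.Dict.getD_of_mem_items _ (by
        rw [h]
        simp only [pvGroupInner]
        exact List.mem_map.mpr ⟨c, hmem, rfl⟩) hnd 0
    rw [PySem.Dict.items_insert_of_contains _ _ hcon, h]
    simp only [pvGroupInner]
    rw [hfilter, List.map_append]
    simp only [List.map_cons, List.map_nil]
    rw [PySem.Set.ofList_append_singleton, PySem.Set.add_of_mem hmem, List.map_map]
    apply List.map_congr_left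
    intro c' hc'
    by_cases hcc : c' = c
    · subst hcc
      simp only [Function.comp, beq_self_eq_true, if_true]
      rw [hgd]
      have hct : (ks ++ [(n, c')]).count (n, c') = ks.count (n, c') + 1 := by
        simp [List.count_append]
      rw [hct]
      push_cast
      ring_nf
    · have hpne : (n, c') ≠ (n, c) := by simp [hcc]
      simp [Function.comp, hcc, List.count_append, hpne.symm]
  · -- fresh key: appended at the end
    have hcon : dn.contains c = false := by
      rw [Bool.eq_false_iff]
      intro hcon
      rw [PySem.Dict.contains_iff_mem_keys, hkeys] at hcon
      exact hmem hcon
    have hgd : dn.getD c 0 = 0 := PySem.Dict.getD_of_not_contains _ _ hcon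
    have hcnt0 : ks.count (n, c) = 0 := by
      rw [List.count_eq_zero]
      intro hks
      apply hmem
      rw [PySem.Set.mem_ofList]
      exact List.mem_map.mpr ⟨(n, c), List.mem_filter.mpr ⟨hks, by simp⟩, rfl⟩
    rw [PySem.Dict.items_insert_of_not_contains _ _ hcon, h]
    simp only [pvGroupInner]
    rw [hfilter, List.map_append]
    simp only [List.map_cons, List.map_nil]
    rw [PySem.Set.ofList_append_singleton, PySem.Set.add_of_not_mem (by simpa using hmem),
        List.map_append]
    congr 1
    · apply List.map_congr_left
      intro c' hc'
      have hcc : c' ≠ c := by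
        intro hh
        exact hmem (hh ▸ hc')
      have hpne : (n, c') ≠ (n, c) := by simp [hcc]
      simp [List.count_append, hpne.symm]
    · simp [hgd, List.count_append, hcnt0]

-- MAIN: A's nested-increment fold, read off as items, is B's closed-form regrouping
theorem pvNestedItems (ks : List (String × String)) :
    ((ks.foldl pvNAdd PySem.Dict.empty).items).map (fun p => (p.1, p.2.items)) = pvGroup ks := by
  induction ks using List.reverseRecOn with
  | nil => rfl
  | append_singleton ks k ih =>
    obtain ⟨n, c⟩ := k
    rw [List.foldl_append, List.foldl_cons, List.foldl_nil]
    set T := ks.foldl pvNAdd PySem.Dict.empty with hT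
    have hTk : T.keys = PySem.Set.ofList (ks.map (fun b => b.1)) := pvNAdd_keys ks
    have hTnd : T.keys.Nodup := pvNAdd_keys_nodup ks
    have hgrp : ∀ p ∈ T.items, p.2.items = pvGroupInner ks p.1 := by
      intro p hp
      have hmem : (p.1, p.2.items) ∈ T.items.map (fun p => (p.1, p.2.items)) :=
        List.mem_map.mpr ⟨p, hp, rfl⟩
      rw [ih] at hmem
      obtain ⟨n', _, he⟩ := List.mem_map.mp hmem
      have hn : n' = p.1 := ((Prod.mk.injEq _ _ _ _).mp he).1
      have h2 := ((Prod.mk.injEq _ _ _ _).mp he).2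
      rw [hn] at h2
      exact h2.symm
    have houter : (ks ++ [(n, c)]).map (fun b => b.1) = ks.map (fun b => b.1) ++ [n] := by
      simp
    unfold pvGroup
    rw [houter, PySem.Set.ofList_append_singleton]
    show (pvNAdd T (n, c)).items.map (fun p => (p.1, p.2.items))
      = ((PySem.Set.ofList (ks.map (fun b => b.1))).add n).map
          (fun n' => (n', pvGroupInner (ks ++ [(n, c)]) n'))
    unfold pvNAdd
    dsimp only
    by_cases hc : T.contains n = true
    · -- outer key already present: in-place replacement of the n entry
      have hmemS : n ∈ PySem.Set.ofList (ks.map (fun b => b.1)) := by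
        rw [← hTk]; exact (PySem.Dict.contains_iff_mem_keys _ _).mp hc
      rw [PySem.Set.add_of_mem hmemS]
      have hSkeys : PySem.Set.ofList (ks.map (fun b => b.1)) = T.items.map (fun p => p.1) := by
        rw [← hTk]; rfl
      rw [hSkeys, List.map_map,
        PySem.Dict.items_insert_of_contains _ _ hc, List.map_map]
      apply List.map_congr_left
      intro p hp
      have hitems : p.2.items = pvGroupInner ks p.1 := hgrp p hp
      by_cases hpn : p.1 = n
      · have hpd : T.getD n PySem.Dict.empty = p.2 := by
          have hm : (n, p.2) ∈ T.items := by rw [← hpn]; exact hp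
          exact PySem.Dict.getD_of_mem_items _ hm hTnd _
        simp only [Function.comp, hpn, beq_self_eq_true, if_true]
        rw [hpd]
        exact congrArg (fun l => (n, l)) (pvInnerStep p.2 ks n c (hpn ▸ hitems))
      · have hne : (p.1 == n) = false := by simp [hpn]
        simp only [Function.comp, hne, Bool.false_eq_true, if_false]
        rw [hitems, pvGroupInner_append_ne ks p.1 (n, c) (fun h => hpn h.symm)]
    · -- fresh outer key: the n entry is appended
      have hcf : T.contains n = false := by simpa using hc
      have hnotS : n ∉ PySem.Set.ofList (ks.map (fun b => b.1)) := by
        rw [← hTk]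
        intro hmem
        rw [(PySem.Dict.contains_iff_mem_keys _ _).mpr hmem] at hcf
        cases hcf
      rw [PySem.Set.add_of_not_mem hnotS]
      have hgd : T.getD n PySem.Dict.empty = PySem.Dict.empty :=
        PySem.Dict.getD_of_not_contains _ _ hcf
      rw [hgd, PySem.Dict.items_insert_of_not_contains _ _ hcf, List.map_append, ih,
          List.map_append]
      have hGnil : pvGroupInner ks n = [] := by
        unfold pvGroupInner
        have hfil : ks.filter (fun b => b.1 == n) = [] := by
          rw [List.filter_eq_nil_iff]
          intro b hb
          simp only [beq_iff_eq]
          intro hbn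
          exact hnotS ((PySem.Set.mem_ofList _ _).mpr (List.mem_map.mpr ⟨b, hb, hbn⟩))
        rw [hfil]
        rfl
      congr 1
      · unfold pvGroup
        apply List.map_congr_left
        intro n' hn'
        have hne : n ≠ n' := fun h => hnotS (h ▸ hn')
        rw [pvGroupInner_append_ne ks n' (n, c) hne]
        rfl
      · simp only [List.map_cons, List.map_nil]
        exact congrArg (fun l => [(n, l)])
          (pvInnerStep PySem.Dict.empty ks n c (by rw [hGnil]; rfl))

-- set-of-a-constant-list: a nonempty all-equal list dedups to the singleton
theorem pvFoldlAdd_const {α β : Type} [BEq α] [LawfulBEq α] (a : α) :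
    ∀ (l : List β) (s : PySem.Set α), a ∈ s →
      (l.map (fun _ => a)).foldl PySem.Set.add s = s := by
  intro l
  induction l with
  | nil => intro s _; rfl
  | cons x tl ih =>
    intro s hs
    rw [List.map_cons, List.foldl_cons, PySem.Set.add_of_mem hs]
    exact ih s hs

theorem pvOfList_const {α β : Type} [BEq α] [LawfulBEq α] (a : α) (l : List β) (hl : l ≠ []) :
    PySem.Set.ofList (l.map (fun _ => a)) = [a] := by
  cases l with
  | nil => exact absurd rfl hl
  | cons x tl =>
    rw [List.map_cons, PySem.Set.ofList_eq_foldl, List.foldl_cons]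
    have h1 : PySem.Set.add ([] : PySem.Set α) a = [a] :=
      PySem.Set.add_of_not_mem (by simp)
    rw [h1]
    exact pvFoldlAdd_const a tl [a] (by simp)

-- the regrouping of the lifted head stream is B's init comprehension
theorem pvInitGroup (heads : List String) :
    pvGroup (heads.map (fun t => (t, "START")))
      = (PySem.Set.ofList heads).map (fun t => (t, [("START", (heads.count t : Int))])) := by
  unfold pvGroup
  have houter : (heads.map (fun t => (t, "START"))).map
      (fun b : String × String => b.1) = heads := by
    rw [List.map_map]; simp [Function.comp_def]
  rw [houter]
  apply List.map_congr_left
  intro t ht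
  have htmem : t ∈ heads := (PySem.Set.mem_ofList _ _).mp ht
  have hfil : (heads.map (fun t' => (t', "START"))).filter (fun b => b.1 == t)
      = (heads.filter (fun t' => t' == t)).map (fun t' => (t', "START")) := by
    rw [List.filter_map]
    rfl
  rw [hfil, List.map_map]
  have hconst : ((heads.filter (fun t' => t' == t)).map
      ((fun b : String × String => b.2) ∘ (fun t' => (t', "START"))))
      = (heads.filter (fun t' => t' == t)).map (fun _ => "START") := rfl
  rw [hconst, pvOfList_const "START" _ (by
    intro hnil
    have : t ∈ heads.filter (fun t' => t' == t) := List.mem_filter.mpr ⟨htmem, by simp⟩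
    rw [hnil] at this
    cases this)]
  rw [List.map_cons, List.map_nil]
  have hcnt : (heads.map (fun t' => (t', "START"))).count (t, "START") = heads.count t :=
    List.count_map_of_injective heads (fun t' => (t', "START"))
      (fun a b h => ((Prod.mk.injEq _ _ _ _).mp h).1) t
  rw [hcnt]

-- B's filterMap head extraction is the flatMap head stream
theorem pvHeads_eq (train : List (List (String × String))) :
    train.filterMap (fun sen => sen.head?.map (fun p => p.2)) = train.flatMap pvHeadsOf := by
  induction train with
  | nil => rfl
  | cons sen rest ih =>
    cases sen with
    | nil => simpa [pvHeadsOf] using ih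
    | cons p tl => simpa [pvHeadsOf] using ih

-- B's zip/slice bigram extraction is the flatMap pair-event stream
theorem pvBigrams_eq (train : List (List (String × String))) :
    train.flatMap (fun sen =>
      (List.zip sen (PySem.List.slice sen (some 1) none)).map (fun pq => (pq.2.2, pq.1.2)))
      = train.flatMap pvPairKeys := by
  apply List.flatMap_congr
  intro sen _
  rw [PySem.List.slice_from_one]
  rfl

-- ===== VERDICT (by name: the statement is the Claim_ definition above) =====
theorem count_tagspairs_spec : Claim_equal_count_tagspairs := by
  intro train wordtag words_types _dom
  unfold Spec_count_tagspairs count_tagspairs count_tagspairs_alt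
  dsimp only
  -- A's interleaved fold splits into a pair-event fold and an initial-tag fold
  have hA : train.foldl
      (fun st sen => (PySem.List.pyRange 0 (sen.length : Int) 1).foldl (pvAStep sen) st)
      (PySem.Dict.empty, PySem.Dict.empty)
      = ((train.flatMap pvPairKeys).foldl pvNAdd PySem.Dict.empty,
         ((train.flatMap pvHeadsOf).map (fun tg => (tg, "START"))).foldl pvNAdd PySem.Dict.empty) := by
    have hfun : (fun (st : pvD2 × pvD2) sen =>
          (PySem.List.pyRange 0 (sen.length : Int) 1).foldl (pvAStep sen) st)
        = (fun st sen => ((pvPairKeys sen).foldl pvNAdd st.1,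
            (pvHeadsOf sen).foldl (fun i tg => pvNAdd i (tg, "START")) st.2)) := by
      funext st sen
      rw [pvInnerLoop, pvKeysIdx_zero_eq]
      cases sen <;> rfl
    rw [hfun, PySem.List.foldl_prod_mk
          (f := fun t sen => (pvPairKeys sen).foldl pvNAdd t)
          (g := fun i sen => (pvHeadsOf sen).foldl (fun i tg => pvNAdd i (tg, "START")) i),
        ← List.foldl_flatMap, ← List.foldl_flatMap,
        ← List.foldl_map (f := fun tg => (tg, "START")) (g := pvNAdd)]
  rw [hA]
  dsimp only
  rw [pvBigrams_eq, pvHeads_eq]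
  simp only [PySem.List.dedup_eq_ofList]
  rw [pvNestedItems, pvNestedItems, pvInitGroup]
  rfl
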